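-- pv_equiv track=rewrite | github.com/kelceegabbard/phoneMapping | phoneMap.py | find_word_rep
-- ===== SOURCE A (Python) =====
-- from itertools import product
--
-- digit_to_letters = {
--     '2': 'ABC', '3': 'DEF', '4': 'GHI', '5': 'JKL', '6': 'MNO',
--     '7': 'PQRS', '8': 'TUV', '9': 'WXYZ'
-- }
--
-- valid_words = {"ABNORMALLY", "AMERICA", "RUN", "ACHE", "ACID", "CAGE", "WAX", "WAY", "THAT"}
--
-- def possible_letters(digits):
--     letters_list = [digit_to_letters[d] for d in digits if d in digit_to_letters]
--     return letters_list
--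
-- def generate_combo(digits):
--     letters_list = possible_letters(digits)
--     combos = [''.join(letters) for letters in product(*letters_list)]
--     return [word for word in combos if word in valid_words]
--
-- def find_word_rep(phone_num):
--
--     #break num into 3 parts for easier checking
--     area, exchange, num = phone_num[:3], phone_num[3:6], phone_num[6:]
--
--     # check 10 digit rep
--     full_10_digit = generate_combo(phone_num)
--     if full_10_digit:
--         return [f"1-{word}" for word in full_10_digit]
--
--     # check 7 digit rep
--     full_7_digit = generate_combo(exchange + num)
--     if full_7_digit:
--         return [f"1-{area}-{word}" for word in full_7_digit]
--
--     # check for 3 & 4 digit rep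
--
--     #generate for exchange part of the phone number
--     three_digit_words = generate_combo(exchange)
--
--     #generate for num part of phone number
--     four_digit_words = generate_combo(num)
--
--     #if exchange and num have valid reps, return all combos
--     if three_digit_words and four_digit_words:
--         return [f"1-{area}-{ex}-{num}" for ex in three_digit_words for num in four_digit_words]
--
--     #if only exchange has valid reps
--     if three_digit_words:
--         return [f"1-{area}-{ex}-{num}" for ex in three_digit_words]
--
--     #if only num has valid reps
--     if four_digit_words:
--         return [f"1-{area}-{exchange}-{num}" for num in four_digit_words]
--
--     #if no valid combos are found
--     return [f"1-{area}-{exchange}-{num}"]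
-- ===== SOURCE B (Python) =====
-- digit_to_letters = {
--     '2': 'ABC', '3': 'DEF', '4': 'GHI', '5': 'JKL', '6': 'MNO',
--     '7': 'PQRS', '8': 'TUV', '9': 'WXYZ'
-- }
--
-- valid_words = {"ABNORMALLY", "AMERICA", "RUN", "ACHE", "ACID", "CAGE", "WAX", "WAY", "THAT"}
--
-- _LETTER_TO_DIGIT = {c: d for d, ls in digit_to_letters.items() for c in ls}
--
-- def _code(word):
--     return ''.join(_LETTER_TO_DIGIT[c] for c in word)
--
-- # index: digit code -> alphabetical list of valid words with that code
-- _INDEX = {}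
-- for _w in sorted(valid_words):
--     _INDEX.setdefault(_code(_w), []).append(_w)
--
-- def _lookup(digits):
--     key = ''.join(d for d in digits if d in digit_to_letters)
--     return _INDEX.get(key, [])
--
-- def find_word_rep(phone_num):
--     area, exchange, num = phone_num[:3], phone_num[3:6], phone_num[6:]
--     whole = _lookup(phone_num)
--     if whole:
--         return ['1-' + w for w in whole]
--     seven = _lookup(exchange + num)
--     if seven:
--         return ['1-' + area + '-' + w for w in seven]
--     left = _lookup(exchange) or [exchange]
--     right = _lookup(num) or [num]
--     return ['1-' + area + '-' + a + '-' + b for a in left for b in right]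
-- ===== Notes on version B (the rewrite author's own statement) =====
-- stated objective: alternative
-- what changed: B replaces A's itertools.product enumeration of every letter combination (filtered by set membership) with a precomputed digit-code index of the 9 valid words looked up by the segment's mapped digits, and collapses A's four tail branches into one cartesian product with literal-segment fallbacks.
import Mathlib
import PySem

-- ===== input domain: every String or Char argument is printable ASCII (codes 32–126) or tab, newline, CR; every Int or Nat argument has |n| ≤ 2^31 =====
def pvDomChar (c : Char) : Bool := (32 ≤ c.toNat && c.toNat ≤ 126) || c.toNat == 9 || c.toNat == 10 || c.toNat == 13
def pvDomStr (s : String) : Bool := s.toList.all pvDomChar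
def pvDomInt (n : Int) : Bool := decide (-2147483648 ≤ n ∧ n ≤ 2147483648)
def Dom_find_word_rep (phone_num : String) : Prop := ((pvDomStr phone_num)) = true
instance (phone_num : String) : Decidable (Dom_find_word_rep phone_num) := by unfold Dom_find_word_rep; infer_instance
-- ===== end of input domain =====

-- B replaces A's itertools.product enumeration-and-filter by a precomputed digit-code index
-- of the valid words (dict lookup by the segment's mapped digits) and collapses A's four tail
-- branches into one cartesian product with literal-segment fallbacks (alternative algorithm;
-- equal output). Strings are modelled as their char lists internally; joining to String
-- happens at formatting, exactly where Python's ''.join / f-strings produce the final strings.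

-- ===== PORT A =====
-- digit_to_letters[d] as an optional lookup ('d in digit_to_letters' = isSome)
def aLookup (d : Char) : Option (List Char) :=
  if d = '2' then some ['A','B','C'] else if d = '3' then some ['D','E','F'] else
  if d = '4' then some ['G','H','I'] else if d = '5' then some ['J','K','L'] else
  if d = '6' then some ['M','N','O'] else if d = '7' then some ['P','Q','R','S'] else
  if d = '8' then some ['T','U','V'] else if d = '9' then some ['W','X','Y','Z'] else none

-- valid_words (a Python set of words, held as char lists)
def validWords : PySem.Set (List Char) :=
  PySem.Set.ofList (["ABNORMALLY", "AMERICA", "RUN", "ACHE", "ACID", "CAGE", "WAX", "WAY", "THAT"].map String.toList)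

-- possible_letters: [digit_to_letters[d] for d in digits if d in digit_to_letters]
def possibleLetters (digits : List Char) : List (List Char) := digits.filterMap aLookup

-- itertools.product(*letters_list): rightmost pool varies fastest
def combos : List (List Char) → List (List Char)
  | [] => [[]]
  | g :: gs => g.flatMap (fun c => (combos gs).map (fun t => c :: t))

-- generate_combo: enumerate all products, keep those in valid_words
def generate_combo (digits : List Char) : List (List Char) :=
  (combos (possibleLetters digits)).filter (fun w => decide (w ∈ validWords))

def find_word_rep (phone_num : String) : List String :=
  let pl := phone_num.toList
  let area := PySem.List.slice pl none (some 3)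
  let exchange := PySem.List.slice pl (some 3) (some 6)
  let num := PySem.List.slice pl (some 6) none
  let full10 := generate_combo pl
  if full10 ≠ [] then full10.map (fun w => String.ofList (['1','-'] ++ w))
  else
    let full7 := generate_combo (exchange ++ num)
    if full7 ≠ [] then full7.map (fun w => String.ofList (['1','-'] ++ area ++ ['-'] ++ w))
    else
      let three := generate_combo exchange
      let four := generate_combo num
      if three ≠ [] ∧ four ≠ [] then
        three.flatMap (fun ex => four.map (fun nm => String.ofList (['1','-'] ++ area ++ ['-'] ++ ex ++ ['-'] ++ nm)))
      else if three ≠ [] then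
        three.map (fun ex => String.ofList (['1','-'] ++ area ++ ['-'] ++ ex ++ ['-'] ++ num))
      else if four ≠ [] then
        four.map (fun nm => String.ofList (['1','-'] ++ area ++ ['-'] ++ exchange ++ ['-'] ++ nm))
      else [String.ofList (['1','-'] ++ area ++ ['-'] ++ exchange ++ ['-'] ++ num)]

-- ===== PORT B =====
-- keys of digit_to_letters
def bDigitKeys : List Char := ['2','3','4','5','6','7','8','9']

-- _LETTER_TO_DIGIT: dict built from digit_to_letters (letter -> digit)
def bLetterToDigit : PySem.Dict Char Char :=
  ([('2',['A','B','C']), ('3',['D','E','F']), ('4',['G','H','I']), ('5',['J','K','L']),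
    ('6',['M','N','O']), ('7',['P','Q','R','S']), ('8',['T','U','V']), ('9',['W','X','Y','Z'])].flatMap
      (fun p => p.2.map (fun c => (c, p.1)))).foldl (fun d p => PySem.Dict.insert d p.1 p.2) PySem.Dict.empty

-- _LETTER_TO_DIGIT[c] (every letter of a valid word is a key; default never hit)
def bLd (c : Char) : Char := (PySem.Dict.get? bLetterToDigit c).getD '?'

-- _code(word): digit encoding of a word
def bCode (w : List Char) : List Char := w.map bLd

-- _SORTED_WORDS iteration order: sorted(valid_words)
def bSortedWords : List (List Char) :=
  PySem.List.sorted
    (PySem.Set.ofList (["ABNORMALLY", "AMERICA", "RUN", "ACHE", "ACID", "CAGE", "WAX", "WAY", "THAT"].map String.toList))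
    (fun w => w) false

-- _INDEX: digit code -> alphabetical list of valid words with that code
-- (setdefault(c, []).append(w) = insert c (getD c [] ++ [w]): keeps position, appends new keys)
def bIndex : PySem.Dict (List Char) (List (List Char)) :=
  bSortedWords.foldl
    (fun d w => PySem.Dict.insert d (bCode w) (PySem.Dict.getD d (bCode w) [] ++ [w]))
    PySem.Dict.empty

-- _lookup: _INDEX.get(mapped digits of `digits`, [])
def bLookup (digits : List Char) : List (List Char) :=
  PySem.Dict.getD bIndex (digits.filter (fun d => decide (d ∈ bDigitKeys))) []

def find_word_rep_alt (phone_num : String) : List String :=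
  let pl := phone_num.toList
  let area := PySem.List.slice pl none (some 3)
  let exchange := PySem.List.slice pl (some 3) (some 6)
  let num := PySem.List.slice pl (some 6) none
  let whole := bLookup pl
  if whole ≠ [] then whole.map (fun w => String.ofList (['1','-'] ++ w))
  else
    let seven := bLookup (exchange ++ num)
    if seven ≠ [] then seven.map (fun w => String.ofList (['1','-'] ++ area ++ ['-'] ++ w))
    else
      let l := bLookup exchange
      let left := if l ≠ [] then l else [exchange]
      let r := bLookup num
      let right := if r ≠ [] then r else [num]
      left.flatMap (fun a => right.map (fun b => String.ofList (['1','-'] ++ area ++ ['-'] ++ a ++ ['-'] ++ b)))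

-- ===== PRECONDITION & SPEC =====
def Spec_find_word_rep (phone_num : String) (out : List String) : Prop := out = find_word_rep_alt phone_num
instance (phone_num : String) (out : List String) : Decidable (Spec_find_word_rep phone_num out) := by unfold Spec_find_word_rep; infer_instance

-- ===== CLAIM =====
def Claim_equal_find_word_rep : Prop := ∀ (phone_num : String), Dom_find_word_rep phone_num → Spec_find_word_rep phone_num (find_word_rep phone_num)

-- ===== LEMMAS AND PROOFS =====

-- proof-only helper: total version of digit_to_letters[d]
def grpT (d : Char) : List Char := (aLookup d).getD []

theorem aLookup_eq (d : Char) :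
    aLookup d = if decide (d ∈ bDigitKeys) then some (grpT d) else none := by
  by_cases h2 : d = '2'; · subst h2; decide
  by_cases h3 : d = '3'; · subst h3; decide
  by_cases h4 : d = '4'; · subst h4; decide
  by_cases h5 : d = '5'; · subst h5; decide
  by_cases h6 : d = '6'; · subst h6; decide
  by_cases h7 : d = '7'; · subst h7; decide
  by_cases h8 : d = '8'; · subst h8; decide
  by_cases h9 : d = '9'; · subst h9; decide
  have hk : ¬ (d ∈ bDigitKeys) := by simp [bDigitKeys, h2, h3, h4, h5, h6, h7, h8, h9]
  simp [aLookup, h2, h3, h4, h5, h6, h7, h8, h9, hk]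

theorem possibleLetters_eq (digits : List Char) :
    possibleLetters digits = (digits.filter (fun d => decide (d ∈ bDigitKeys))).map grpT := by
  induction digits with
  | nil => rfl
  | cons d rest ih =>
    simp only [possibleLetters, List.filterMap_cons, List.filter_cons] at *
    rw [aLookup_eq d]
    by_cases hk : d ∈ bDigitKeys <;> simp [hk, ih]

theorem mem_combos (gs : List (List Char)) (w : List Char) :
    w ∈ combos gs ↔ List.Forall₂ (fun c g => c ∈ g) w gs := by
  induction gs generalizing w with
  | nil => simp [combos, List.forall₂_nil_right_iff]
  | cons g gs ih =>
    simp only [combos, List.mem_flatMap, List.mem_map, List.forall₂_cons_right_iff]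
    constructor
    · rintro ⟨c, hc, t, ht, rfl⟩
      exact ⟨c, t, hc, (ih t).mp ht, rfl⟩
    · rintro ⟨c, t, hc, ht, rfl⟩
      exact ⟨c, hc, t, (ih t).mpr ht, rfl⟩

theorem pairwise_flatMap_blocks (ts : List (List Char)) (hts : ts.Pairwise (· < ·)) :
    ∀ (g : List Char), g.Pairwise (· < ·) →
      (g.flatMap (fun c => ts.map (fun t => c :: t))).Pairwise (· < ·) := by
  intro g hg
  induction g with
  | nil => simp
  | cons c g' ihg =>
    rw [List.flatMap_cons, List.pairwise_append]
    refine ⟨?_, ihg hg.of_cons, ?_⟩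
    · rw [List.pairwise_map]
      exact hts.imp (fun hlt => List.cons_lt_cons_iff.mpr (Or.inr ⟨rfl, hlt⟩))
    · intro x hx y hy
      simp only [List.mem_map] at hx
      obtain ⟨t1, _, rfl⟩ := hx
      simp only [List.mem_flatMap, List.mem_map] at hy
      obtain ⟨c', hc', t2, _, rfl⟩ := hy
      exact List.cons_lt_cons_iff.mpr (Or.inl ((List.pairwise_cons.mp hg).1 c' hc'))

theorem pairwise_combos (gs : List (List Char)) (h : ∀ g ∈ gs, g.Pairwise (· < ·)) :
    (combos gs).Pairwise (· < ·) := by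
  induction gs with
  | nil => simp [combos]
  | cons g gs ih =>
    exact pairwise_flatMap_blocks (combos gs)
      (ih (fun g' hg' => h g' (by simp [hg']))) g (h g (by simp))

def letterChars : List Char :=
  ['A','B','C','D','E','F','G','H','I','J','K','L','M','N','O','P','Q','R','S','T','U','V','W','X','Y','Z']

theorem mem_grpT_iff : ∀ c ∈ letterChars, ∀ d ∈ bDigitKeys, (c ∈ grpT d ↔ bLd c = d) := by
  intro c hc d hd
  fin_cases hc <;> fin_cases hd <;> decide

theorem enc_iff (w ds : List Char) (hw : ∀ c ∈ w, c ∈ letterChars) (hd : ∀ d ∈ ds, d ∈ bDigitKeys) :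
    List.Forall₂ (fun c g => c ∈ g) w (ds.map grpT) ↔ w.map bLd = ds := by
  induction w generalizing ds with
  | nil =>
    cases ds with
    | nil => simp
    | cons d ds' => simp [List.forall₂_nil_left_iff]
  | cons c cs ih =>
    cases ds with
    | nil => simp
    | cons d ds' =>
      have h1 : c ∈ grpT d ↔ bLd c = d :=
        mem_grpT_iff c (hw c (by simp)) d (hd d (by simp))
      have h2 := ih ds' (fun x hx => hw x (by simp [hx])) (fun x hx => hd x (by simp [hx]))
      simp [List.forall₂_cons, h1, h2]

theorem eq_of_pairwise_lt : ∀ (l₁ l₂ : List (List Char)),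
    l₁.Pairwise (· < ·) → l₂.Pairwise (· < ·) →
    (∀ x, x ∈ l₁ ↔ x ∈ l₂) → l₁ = l₂ := by
  intro l₁
  induction l₁ with
  | nil =>
    intro l₂ _ _ hm
    cases l₂ with
    | nil => rfl
    | cons b t => exact absurd ((hm b).mpr (by simp)) (by simp)
  | cons a t₁ ih =>
    intro l₂ h₁ h₂ hm
    cases l₂ with
    | nil => exact absurd ((hm a).mp (by simp)) (by simp)
    | cons b t₂ =>
      have hab : a = b := by
        have ha : a = b ∨ a ∈ t₂ := by simpa using (hm a).mp (by simp)
        have hb : b = a ∨ b ∈ t₁ := by simpa using (hm b).mpr (by simp)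
        rcases ha with h | ha
        · exact h
        rcases hb with h | hb
        · exact h.symm
        have hba : b < a := (List.pairwise_cons.mp h₂).1 a ha
        have hab' : a < b := (List.pairwise_cons.mp h₁).1 b hb
        exact absurd (lt_trans hba hab') (lt_irrefl b)
      subst hab
      have hm' : ∀ x, x ∈ t₁ ↔ x ∈ t₂ := by
        intro x
        constructor
        · intro hx
          rcases (by simpa using (hm x).mp (by simp [hx]) : x = a ∨ x ∈ t₂) with h | h
          · subst h; exact absurd ((List.pairwise_cons.mp h₁).1 x hx) (lt_irrefl x)
          · exact h
        · intro hx
          rcases (by simpa using (hm x).mpr (by simp [hx]) : x = a ∨ x ∈ t₁) with h | h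
          · subst h; exact absurd ((List.pairwise_cons.mp h₂).1 x hx) (lt_irrefl x)
          · exact h
      rw [ih t₂ h₁.of_cons h₂.of_cons hm']

-- the sorted word list, evaluated to a literal
set_option maxRecDepth 20000 in
theorem bSortedWords_eval :
    bSortedWords = [['A','B','N','O','R','M','A','L','L','Y'],
      ['A','C','H','E'],
      ['A','C','I','D'],
      ['A','M','E','R','I','C','A'],
      ['C','A','G','E'],
      ['R','U','N'],
      ['T','H','A','T'],
      ['W','A','X'],
      ['W','A','Y']] := by
  decide

set_option maxRecDepth 20000 in
theorem valid_perm : validWords.Perm bSortedWords := by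
  rw [bSortedWords_eval]
  unfold validWords
  decide

theorem mem_valid_iff (x : List Char) : x ∈ validWords ↔ x ∈ bSortedWords :=
  valid_perm.mem_iff

theorem valid_letters : ∀ x ∈ bSortedWords, ∀ c ∈ x, c ∈ letterChars := by
  rw [bSortedWords_eval]
  intro x hx
  simp only [List.mem_cons, List.not_mem_nil, or_false] at hx
  rcases hx with rfl | rfl | rfl | rfl | rfl | rfl | rfl | rfl | rfl <;> simp [letterChars]

theorem bSorted_pairwise : bSortedWords.Pairwise (· < ·) := by
  rw [bSortedWords_eval]
  decide

theorem grpT_pairwise : ∀ d ∈ bDigitKeys, (grpT d).Pairwise (· < ·) := by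
  intro d hd
  fin_cases hd <;> decide

-- A's generate_combo, characterised as a filter of the sorted valid words by digit code
theorem gc_filter (digits : List Char) :
    generate_combo digits
      = bSortedWords.filter (fun w => bCode w == digits.filter (fun d => decide (d ∈ bDigitKeys))) := by
  unfold generate_combo
  rw [possibleLetters_eq]
  set ds := digits.filter (fun d => decide (d ∈ bDigitKeys)) with hds
  have hd : ∀ d ∈ ds, d ∈ bDigitKeys := by
    intro d hdm
    rw [hds] at hdm
    simpa using (List.mem_filter.mp hdm).2
  apply eq_of_pairwise_lt
  · refine List.Pairwise.sublist List.filter_sublist (pairwise_combos _ ?_)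
    intro g hg
    simp only [List.mem_map] at hg
    obtain ⟨d, hdm, rfl⟩ := hg
    exact grpT_pairwise d (hd d hdm)
  · exact List.Pairwise.sublist List.filter_sublist bSorted_pairwise
  · intro x
    simp only [List.mem_filter, decide_eq_true_eq, mem_combos, beq_iff_eq]
    constructor
    · rintro ⟨hx, hv⟩
      have hxs : x ∈ bSortedWords := (mem_valid_iff x).mp hv
      refine ⟨hxs, ?_⟩
      have := (enc_iff x ds (valid_letters x hxs) hd).mp hx
      simpa [bCode] using this
    · rintro ⟨hxs, hc⟩
      refine ⟨?_, (mem_valid_iff x).mpr hxs⟩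
      exact (enc_iff x ds (valid_letters x hxs) hd).mpr (by simpa [bCode] using hc)

-- B's index, evaluated to a literal dict
set_option maxRecDepth 40000 in
theorem bIndex_eval :
    bIndex = PySem.Dict.ofList
      [("2266762559".toList, [['A','B','N','O','R','M','A','L','L','Y']]),
       ("2243".toList, [['A','C','H','E'], ['A','C','I','D'], ['C','A','G','E']]),
       ("2637422".toList, [['A','M','E','R','I','C','A']]),
       ("786".toList, [['R','U','N']]),
       ("8428".toList, [['T','H','A','T']]),
       ("929".toList, [['W','A','X'], ['W','A','Y']])] := by
  decide

-- looking the index up by an arbitrary key is the same filter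
set_option maxRecDepth 40000 in
theorem bIndex_getD (key : List Char) :
    PySem.Dict.getD bIndex key [] = bSortedWords.filter (fun w => bCode w == key) := by
  rw [bIndex_eval, bSortedWords_eval]
  by_cases h1 : key = "2266762559".toList; · subst h1; decide
  by_cases h2 : key = "2243".toList; · subst h2; decide
  by_cases h3 : key = "2637422".toList; · subst h3; decide
  by_cases h4 : key = "786".toList; · subst h4; decide
  by_cases h5 : key = "8428".toList; · subst h5; decide
  by_cases h6 : key = "929".toList; · subst h6; decide
  have e1 : ((['2','2','6','6','7','6','2','5','5','9'] : List Char) == key) = false := by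
    simp only [beq_eq_false_iff_ne, ne_eq]; intro h; exact h1 (by rw [← h]; rfl)
  have e2 : ((['2','2','4','3'] : List Char) == key) = false := by
    simp only [beq_eq_false_iff_ne, ne_eq]; intro h; exact h2 (by rw [← h]; rfl)
  have e3 : ((['2','6','3','7','4','2','2'] : List Char) == key) = false := by
    simp only [beq_eq_false_iff_ne, ne_eq]; intro h; exact h3 (by rw [← h]; rfl)
  have e4 : ((['7','8','6'] : List Char) == key) = false := by
    simp only [beq_eq_false_iff_ne, ne_eq]; intro h; exact h4 (by rw [← h]; rfl)
  have e5 : ((['8','4','2','8'] : List Char) == key) = false := by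
    simp only [beq_eq_false_iff_ne, ne_eq]; intro h; exact h5 (by rw [← h]; rfl)
  have e6 : ((['9','2','9'] : List Char) == key) = false := by
    simp only [beq_eq_false_iff_ne, ne_eq]; intro h; exact h6 (by rw [← h]; rfl)
  have c1 : bCode ['A','B','N','O','R','M','A','L','L','Y'] = ['2','2','6','6','7','6','2','5','5','9'] := by decide
  have c2 : bCode ['A','C','H','E'] = ['2','2','4','3'] := by decide
  have c3 : bCode ['A','C','I','D'] = ['2','2','4','3'] := by decide
  have c4 : bCode ['A','M','E','R','I','C','A'] = ['2','6','3','7','4','2','2'] := by decide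
  have c5 : bCode ['C','A','G','E'] = ['2','2','4','3'] := by decide
  have c6 : bCode ['R','U','N'] = ['7','8','6'] := by decide
  have c7 : bCode ['T','H','A','T'] = ['8','4','2','8'] := by decide
  have c8 : bCode ['W','A','X'] = ['9','2','9'] := by decide
  have c9 : bCode ['W','A','Y'] = ['9','2','9'] := by decide
  simp [PySem.Dict.getD, PySem.Dict.get?, PySem.Dict.ofList, PySem.Dict.update,
        PySem.Dict.insert, PySem.Dict.empty, PySem.Dict.contains,
        List.find?, List.filter, c1, c2, c3, c4, c5, c6, c7, c8, c9,
        e1, e2, e3, e4, e5, e6]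


-- A's and B's core lookups coincide
theorem gc_eq (digits : List Char) : generate_combo digits = bLookup digits := by
  rw [gc_filter, bLookup, bIndex_getD]

set_option maxRecDepth 100000 in
theorem ports_agree (phone_num : String) : find_word_rep phone_num = find_word_rep_alt phone_num := by
  unfold find_word_rep find_word_rep_alt
  simp only [gc_eq]
  set pl := phone_num.toList
  set area := PySem.List.slice pl none (some 3)
  set exchange := PySem.List.slice pl (some 3) (some 6)
  set num := PySem.List.slice pl (some 6) none
  by_cases h10 : bLookup pl = []
  · simp only [h10, ne_eq, not_true_eq_false, if_false]
    by_cases h7 : bLookup (exchange ++ num) = []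
    · simp only [h7, not_true_eq_false, if_false]
      by_cases h3 : bLookup exchange = []
      all_goals by_cases h4 : bLookup num = []
      all_goals simp only [h3, h4, not_true_eq_false, not_false_eq_true, if_true, if_false,
                   and_self, and_true, and_false, List.flatMap_nil,
                   List.flatMap_cons, List.map_nil, List.map_cons, List.append_nil]
      all_goals rw [← List.map_eq_flatMap]
    · simp [h7]
  · simp [h10]

-- ===== VERDICT =====
theorem find_word_rep_spec : Claim_equal_find_word_rep := by
  intro phone_num _
  unfold Spec_find_word_rep
  exact ports_agree phone_num
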